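-- pv_equiv track=rewrite | github.com/cse442-fall-2019-offering/442projects-django-mango | backend/user_group/sort.py | avai_group
-- ===== SOURCE A (Python) =====
-- def avai_group(groups):
--   avai_g = []
--   full_g = []
--   avai_g_count = 0
--
--   for g in groups:
--     if len(g[3]) < 5:
--       avai_g.append(g)
--       avai_g_count += 1
--     else:
--       full_g.append(g)
--   avai_g += full_g
--   return avai_g,avai_g_count #
-- ===== SOURCE B (Python) =====
-- def avai_group(groups):
--   # B: one stable sort by fullness (False=available first) + an independent count.
--   return (sorted(groups, key=lambda g: len(g[3]) >= 5),
--           sum(1 for g in groups if len(g[3]) < 5))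
-- ===== Notes on version B (the rewrite author's own statement) =====
-- stated objective: idiomatic
-- what changed: Replaces the manual two-list partition loop with a single stable sort on the boolean key len(g[3])>=5 (Timsort stability keeps available groups first in original order) and counts the available groups with an independent sum.
import Mathlib
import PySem

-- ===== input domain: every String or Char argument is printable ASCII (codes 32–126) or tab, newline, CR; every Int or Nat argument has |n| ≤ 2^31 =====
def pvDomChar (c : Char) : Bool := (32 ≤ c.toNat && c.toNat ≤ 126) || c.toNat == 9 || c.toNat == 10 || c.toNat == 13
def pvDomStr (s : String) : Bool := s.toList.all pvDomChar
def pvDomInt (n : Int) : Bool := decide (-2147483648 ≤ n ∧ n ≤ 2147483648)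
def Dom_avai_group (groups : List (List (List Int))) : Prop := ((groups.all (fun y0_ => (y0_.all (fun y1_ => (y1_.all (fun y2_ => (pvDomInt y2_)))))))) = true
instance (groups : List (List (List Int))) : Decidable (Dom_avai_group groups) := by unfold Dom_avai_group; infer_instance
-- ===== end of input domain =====

-- B replaces A's partition loop with one stable sort on the boolean key len(g[3])>=5
-- plus an independent count; equivalence proved below. No argument is mutated.

-- ===== PORT A =====
-- g[3] is ported as pyGetD g 3 []: exact on Pre_ (every row has length ≥ 4), where Python's g[3] returns.
def avai_group (groups : List (List (List Int))) : List (List (List Int)) × Int :=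
  let s := groups.foldl
    (fun (s : List (List (List Int)) × List (List (List Int)) × Int) g =>
      if (PySem.List.pyGetD g 3 []).length < 5 then (s.1 ++ [g], s.2.1, s.2.2 + 1)
      else (s.1, s.2.1 ++ [g], s.2.2))
    ([], [], 0)
  (s.1 ++ s.2.1, s.2.2)

-- ===== PORT B =====
-- sorted(groups, key=lambda g: len(g[3]) >= 5) : stable sort on a Bool key (False < True);
-- sum(1 for g in groups if len(g[3]) < 5) as a left fold.
def avai_group_alt (groups : List (List (List Int))) : List (List (List Int)) × Int :=
  (PySem.List.sorted groups (fun g => decide (5 ≤ (PySem.List.pyGetD g 3 []).length)) false,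
   groups.foldl (fun acc g => if (PySem.List.pyGetD g 3 []).length < 5 then acc + 1 else acc) (0 : Int))

-- ===== PRECONDITION & SPEC =====
-- Pre_ excludes exactly the inputs where Python A raises IndexError (a row g with len(g) < 4 on g[3]).
def Pre_avai_group (groups : List (List (List Int))) : Prop := ∀ g ∈ groups, 4 ≤ g.length
instance (groups : List (List (List Int))) : Decidable (Pre_avai_group groups) := by unfold Pre_avai_group; infer_instance
def pvWitness_avai_group : List (List (List Int)) := [[[1], [2], [], [0, 1, 2, 3, 4]], [[], [], [], []]]

def Spec_avai_group (groups : List (List (List Int))) (out : List (List (List Int)) × Int) : Prop := out = avai_group_alt groups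
instance (groups : List (List (List Int))) (out : List (List (List Int)) × Int) : Decidable (Spec_avai_group groups out) := by unfold Spec_avai_group; infer_instance

-- ===== CLAIM (what is proved, stated in full; the proofs are below) =====
def Claim_equal_avai_group : Prop := ∀ (groups : List (List (List Int))), Dom_avai_group groups → Pre_avai_group groups → Spec_avai_group groups (avai_group groups)

-- ===== LEMMAS AND PROOFS =====

-- Inserting an element with key = false into (falses ++ trues) puts it after the falses.
theorem insertBy_bool_false {α : Type} (key : α → Bool) (x : α) (hx : key x = false)
    (f t : List α) (hf : ∀ y ∈ f, key y = false) (ht : ∀ y ∈ t, key y = true) :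
    PySem.List.insertBy (fun a b => decide (key a < key b)) x (f ++ t) = (f ++ [x]) ++ t := by
  induction f with
  | nil =>
    cases t with
    | nil => simp [PySem.List.insertBy]
    | cons y ys =>
      have hy : key y = true := ht y (by simp)
      simp [PySem.List.insertBy, hx, hy]
  | cons z f' ih =>
    have hz : key z = false := hf z (by simp)
    simp only [List.cons_append, PySem.List.insertBy, hx, hz]
    simp only [decide_eq_true_eq]
    rw [if_neg (by simp)]
    simp [ih (fun y hy => hf y (by simp [hy]))]

-- Inserting an element with key = true goes to the very end.
theorem insertBy_bool_true {α : Type} (key : α → Bool) (x : α) (hx : key x = true)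
    (l : List α) :
    PySem.List.insertBy (fun a b => decide (key a < key b)) x l = l ++ [x] := by
  apply PySem.List.insertBy_of_forall_not_before
  intro y _
  simp [hx]

-- Stable sort on a Bool key is the stable partition: falses first, then trues.
theorem sorted_bool_partition {α : Type} (key : α → Bool) (xs f t : List α)
    (hf : ∀ y ∈ f, key y = false) (ht : ∀ y ∈ t, key y = true) :
    xs.foldl (fun acc x => PySem.List.insertBy (fun a b => decide (key a < key b)) x acc) (f ++ t)
      = (f ++ xs.filter (fun x => !key x)) ++ (t ++ xs.filter key) := by
  induction xs generalizing f t with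
  | nil => simp
  | cons x xs ih =>
    simp only [List.foldl_cons, List.filter_cons]
    cases hx : key x with
    | false =>
      rw [insertBy_bool_false key x hx f t hf ht]
      rw [ih (f ++ [x]) t
        (by intro y hy; rcases List.mem_append.mp hy with h | h
            · exact hf y h
            · simp at h; simpa [h] using hx) ht]
      simp [hx]
    | true =>
      rw [insertBy_bool_true key x hx, List.append_assoc]
      rw [ih f (t ++ [x]) hf
        (by intro y hy; rcases List.mem_append.mp hy with h | h
            · exact ht y h
            · simp at h; simpa [h] using hx)]
      simp [hx]

-- A's loop computes (prefix ++ available-filter, prefix ++ full-filter, count + available-count).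
theorem avai_loop_spec (xs : List (List (List Int))) (a f : List (List (List Int))) (c : Int) :
    xs.foldl
      (fun (s : List (List (List Int)) × List (List (List Int)) × Int) g =>
        if (PySem.List.pyGetD g 3 []).length < 5 then (s.1 ++ [g], s.2.1, s.2.2 + 1)
        else (s.1, s.2.1 ++ [g], s.2.2)) (a, f, c)
      = (a ++ xs.filter (fun g => decide ((PySem.List.pyGetD g 3 []).length < 5)),
         f ++ xs.filter (fun g => !decide ((PySem.List.pyGetD g 3 []).length < 5)),
         c + (xs.countP (fun g => decide ((PySem.List.pyGetD g 3 []).length < 5)) : Int)) := by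
  induction xs generalizing a f c with
  | nil => simp
  | cons x xs ih =>
    simp only [List.foldl_cons, List.filter_cons, List.countP_cons]
    by_cases hx : (PySem.List.pyGetD x 3 []).length < 5
    · rw [if_pos hx, ih]
      simp [hx]
      ring
    · rw [if_neg hx, ih]
      simp [hx]

-- Specialisation: sorted on a Bool key = stable partition.
theorem sorted_bool_eq {α : Type} (key : α → Bool) (xs : List α) :
    PySem.List.sorted xs key false = xs.filter (fun x => !key x) ++ xs.filter key := by
  rw [PySem.List.sorted_eq_foldl_insertBy]
  simpa using sorted_bool_partition key xs [] [] (by simp) (by simp)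

-- ===== VERDICT (by name: the statement is the Claim_ definition above) =====
theorem avai_group_spec : Claim_equal_avai_group := by
  intro groups _ _
  unfold Spec_avai_group avai_group avai_group_alt
  rw [avai_loop_spec, sorted_bool_eq, PySem.List.foldl_ite_add_one]
  dsimp only
  refine Prod.ext ?_ ?_
  · simp only [List.nil_append]
    congr 1
    · apply List.filter_congr; intro g _; rw [← decide_not, decide_eq_decide]; omega
    · apply List.filter_congr; intro g _; rw [← decide_not, decide_eq_decide]; omega
  · simp
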